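-- pv_equiv track=rewrite | github.com/PaulBlazek/PocketFlow-Tutorial-Danganronpa-Simulator | app.py | format_vote_summary
-- ===== SOURCE A (Python) =====
-- def format_vote_summary(individual_votes):
--     """Formats a list of votes into an aggregated summary string.
--
--     Args:
--         individual_votes (list): List of tuples (actor_name, target_name).
--                                 target_name can be None for Abstain.
--
--     Returns:
--         str: A formatted string summarizing the votes, or an empty string
--              if no votes were cast.
--     """
--     if not individual_votes:
--         return ""
--
--     votes_by_target = {}
--     for actor, target in individual_votes:
--         target_display = target if target is not None else "Abstain"
--         if target_display not in votes_by_target: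
--             votes_by_target[target_display] = []
--         votes_by_target[target_display].append(actor)
--
--     summary_lines = []
--     # Sort targets alphabetically, potentially placing "Abstain" last or first if needed
--     sorted_targets = sorted(votes_by_target.keys(), key=lambda x: (x == "Abstain", x))
--
--     for target in sorted_targets:
--         voters = votes_by_target[target]
--         voter_list_str = ", ".join(sorted(voters)) # Sort voters for consistent output
--         summary_lines.append(f"- **{target}** ({len(voters)}): {voter_list_str}")
--
--     return "\n\n**Vote Breakdown:**\n" + "\n".join(summary_lines)
-- ===== SOURCE B (Python) =====
-- def _display(target):
--     return "Abstain" if target is None else target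
--
--
-- def format_vote_summary(individual_votes):
--     if not individual_votes:
--         return ""
--     targets = sorted(dict.fromkeys(_display(t) for _, t in individual_votes),
--                      key=lambda x: (x == "Abstain", x))
--     lines = [
--         f"- **{tgt}** ({len(voters)}): {', '.join(voters)}"
--         for tgt in targets
--         for voters in [sorted(a for a, t in individual_votes if _display(t) == tgt)]
--     ]
--     return "\n\n**Vote Breakdown:**\n" + "\n".join(lines)
-- ===== Notes on version B (the rewrite author's own statement) =====
-- stated objective: simpler
-- what changed: Replaced the mutable dict-of-lists aggregation pass with a declarative pipeline: dedup the display names once, sort them by the (is-Abstain, name) key, and build each group's sorted voter list by a direct filter comprehension.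
import Mathlib
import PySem

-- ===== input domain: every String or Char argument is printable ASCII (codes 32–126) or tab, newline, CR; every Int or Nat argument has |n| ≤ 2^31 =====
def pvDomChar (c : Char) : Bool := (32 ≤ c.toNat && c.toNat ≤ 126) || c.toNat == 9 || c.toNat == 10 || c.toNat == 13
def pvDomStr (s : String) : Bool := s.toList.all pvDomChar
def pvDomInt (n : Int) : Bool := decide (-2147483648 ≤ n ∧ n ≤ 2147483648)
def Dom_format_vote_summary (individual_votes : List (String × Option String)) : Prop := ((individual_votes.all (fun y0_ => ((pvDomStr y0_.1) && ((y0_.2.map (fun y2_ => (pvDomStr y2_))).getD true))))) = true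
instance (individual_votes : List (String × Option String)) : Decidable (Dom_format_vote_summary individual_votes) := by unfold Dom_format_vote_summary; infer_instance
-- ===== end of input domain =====

-- B replaces A's mutable dict-of-lists aggregation with a dedup-sort-filter pipeline (objective: simpler).

-- ===== PORT A =====
-- 'target if target is not None else "Abstain"'
def pvDispA (t : Option String) : String :=
  match t with
  | some s => s
  | none => "Abstain"

def format_vote_summary (individual_votes : List (String × Option String)) : String :=
  if individual_votes = [] then ""
  else
    -- for actor, target in individual_votes: setdefault-[] then append
    let votes_by_target : PySem.Dict String (List String) :=
      individual_votes.foldl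
        (fun d p =>
          let td := pvDispA p.2
          let d := if d.contains td then d else d.insert td []
          d.modify td [] (fun v => v ++ [p.1]))
        PySem.Dict.empty
    let sorted_targets :=
      PySem.List.sorted2 votes_by_target.keys
        (fun x => if x == "Abstain" then (1 : Nat) else 0) (fun x => x)
    let summary_lines :=
      sorted_targets.foldl
        (fun acc target =>
          let voters := votes_by_target.getD target []
          acc ++ ["- **" ++ target ++ "** (" ++ PySem.Int.toStr (voters.length : Int) ++ "): "
                   ++ PySem.Str.join ", " (PySem.List.sorted voters (fun x => x))])
        []
    "\n\n**Vote Breakdown:**\n" ++ PySem.Str.join "\n" summary_lines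

-- ===== PORT B =====
-- '_display(target)'
def pvDispB (t : Option String) : String :=
  match t with
  | none => "Abstain"
  | some s => s

def format_vote_summary_alt (individual_votes : List (String × Option String)) : String :=
  if individual_votes = [] then ""
  else
    let targets :=
      PySem.List.sorted2 (PySem.List.dedup (individual_votes.map (fun p => pvDispB p.2)))
        (fun x => if x == "Abstain" then (1 : Nat) else 0) (fun x => x)
    let lines :=
      targets.map (fun tgt =>
        let voters :=
          PySem.List.sorted
            ((individual_votes.filter (fun p => pvDispB p.2 == tgt)).map (fun p => p.1))
            (fun x => x)
        "- **" ++ tgt ++ "** (" ++ PySem.Int.toStr (voters.length : Int) ++ "): "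
          ++ PySem.Str.join ", " voters)
    "\n\n**Vote Breakdown:**\n" ++ PySem.Str.join "\n" lines

-- ===== PRECONDITION & SPEC =====
def Spec_format_vote_summary (individual_votes : List (String × Option String)) (out : String) : Prop := out = format_vote_summary_alt individual_votes
instance (individual_votes : List (String × Option String)) (out : String) : Decidable (Spec_format_vote_summary individual_votes out) := by unfold Spec_format_vote_summary; infer_instance

-- ===== CLAIM (what is proved, stated in full; the proofs are below) =====
def Claim_equal_format_vote_summary : Prop := ∀ (individual_votes : List (String × Option String)), Dom_format_vote_summary individual_votes → Spec_format_vote_summary individual_votes (format_vote_summary individual_votes)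

-- ===== LEMMAS AND PROOFS =====

theorem pvDisp_eq (t : Option String) : pvDispA t = pvDispB t := by
  cases t <;> rfl

-- A's conditional "ensure key exists, then append" step is the plain modify step.
theorem pvStepA_eq (d : PySem.Dict String (List String)) (td a : String) :
    (if d.contains td then d else d.insert td []).modify td [] (fun v => v ++ [a])
      = d.modify td [] (fun v => v ++ [a]) := by
  by_cases h : d.contains td = true
  · simp [h]
  · have hfalse : d.contains td = false := by simpa using h
    simp only [hfalse, Bool.false_eq_true, if_false, PySem.Dict.modify]
    rw [PySem.Dict.getD_insert_self, PySem.Dict.insert_insert_self,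
        PySem.Dict.getD_of_not_contains d [] hfalse]

theorem format_vote_summary_eq (individual_votes : List (String × Option String)) :
    format_vote_summary individual_votes = format_vote_summary_alt individual_votes := by
  unfold format_vote_summary format_vote_summary_alt
  by_cases hnil : individual_votes = []
  · simp [hnil]
  · simp only [hnil, if_false]
    -- normalise A's dict fold
    have hfold :
        individual_votes.foldl
          (fun d p =>
            let td := pvDispA p.2
            let d := if d.contains td then d else d.insert td []
            d.modify td [] (fun v => v ++ [p.1]))
          PySem.Dict.empty
        = individual_votes.foldl
            (fun d p => d.modify (pvDispB p.2) [] (fun v => v ++ [p.1]))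
            PySem.Dict.empty := by
      apply PySem.List.foldl_congr_mem
      intro acc x _
      simp only [pvDisp_eq]
      exact pvStepA_eq acc (pvDispB x.2) x.1
    rw [hfold]
    set d := individual_votes.foldl
        (fun d p => d.modify (pvDispB p.2) [] (fun v => v ++ [p.1]))
        PySem.Dict.empty with hd
    -- keys of the aggregation dict = dedup of the display names
    have hkeys : d.keys = PySem.List.dedup (individual_votes.map (fun p => pvDispB p.2)) := by
      rw [hd, PySem.Dict.keys_foldl_modify_key individual_votes (fun p => pvDispB p.2) []
            (fun _ p => fun v => v ++ [p.1]) PySem.Dict.empty]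
      simp [PySem.Set.update, PySem.Set.ofList_eq_foldl, PySem.List.dedup_eq_ofList]
    -- lookup in the aggregation dict = filter of the votes for that target
    have hgetD : ∀ c, d.getD c [] =
        (individual_votes.filter (fun p => pvDispB p.2 == c)).map (fun p => p.1) := by
      intro c
      have hmap : d = (individual_votes.map (fun p => (pvDispB p.2, p.1))).foldl
          (fun d q => d.modify q.1 [] (fun v => v ++ [q.2])) PySem.Dict.empty := by
        rw [hd, List.foldl_map]
      rw [hmap, PySem.Dict.getD_foldl_modify_append]
      simp [List.filter_map, List.map_map, Function.comp_def]
    rw [hkeys]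
    rw [PySem.List.foldl_append_singleton_eq_map]
    simp only [List.nil_append]
    congr 1
    congr 1
    apply List.map_congr_left
    intro tgt _
    rw [hgetD tgt]
    rw [PySem.List.length_sorted]

-- ===== VERDICT (by name: the statement is the Claim_ definition above) =====
theorem format_vote_summary_spec : Claim_equal_format_vote_summary := by
  intro v _
  unfold Spec_format_vote_summary
  exact format_vote_summary_eq v
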